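-- pv_equiv track=rewrite | github.com/yesjjin99/Python-study | Yejin/Baekjoon/분할정복/17829.py | pooling
-- ===== SOURCE A (Python) =====
-- def pooling(arr, n):
--   if n == 1:
--     return arr[0][0]
--
--   new_arr = [[] for _ in range(n // 2)]
--   for i in range(0, n, 2):
--     for j in range(0, n, 2):
--       new_arr[i // 2].append(sorted([arr[i][j], arr[i][j+1], arr[i+1][j], arr[i+1][j+1]])[2])
--
--   return pooling(new_arr, n // 2)
-- ===== SOURCE B (Python) =====
-- def pooling(arr, n):
--   while n > 1:
--     arr = [[sorted([arr[i][j], arr[i][j+1], arr[i+1][j], arr[i+1][j+1]])[2]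
--             for j in range(0, n, 2)]
--            for i in range(0, n, 2)]
--     n //= 2
--   return arr[0][0]
-- ===== Notes on version B (the rewrite author's own statement) =====
-- stated objective: simpler
-- what changed: Replaces the recursion and the pre-allocated new_arr mutated by indexed append with a while-loop that rebuilds the grid each round via a nested list comprehension; the 4-element sort/index kernel is unchanged.
import Mathlib
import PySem

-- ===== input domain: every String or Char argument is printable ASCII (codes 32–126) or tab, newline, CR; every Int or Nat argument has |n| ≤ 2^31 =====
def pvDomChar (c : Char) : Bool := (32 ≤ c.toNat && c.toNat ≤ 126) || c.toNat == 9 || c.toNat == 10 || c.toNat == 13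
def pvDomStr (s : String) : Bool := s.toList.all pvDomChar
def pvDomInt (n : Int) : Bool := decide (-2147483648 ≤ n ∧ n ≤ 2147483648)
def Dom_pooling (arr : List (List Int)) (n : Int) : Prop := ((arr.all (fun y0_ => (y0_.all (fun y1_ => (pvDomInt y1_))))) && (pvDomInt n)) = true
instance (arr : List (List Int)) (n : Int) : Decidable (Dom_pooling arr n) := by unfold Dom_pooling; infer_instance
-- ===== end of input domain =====

-- B replaces A's recursion and index-mutated new_arr with a while-loop rebuilding the
-- grid via nested comprehensions (same 4-element sort kernel); return values agree on Pre_.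

-- arr[i][j], shared by both ports (both Pythons write the identical expression)
def pvCell (arr : List (List Int)) (i j : Int) : Int :=
  PySem.List.pyGetD (PySem.List.pyGetD arr i []) j 0

-- sorted([arr[i][j], arr[i][j+1], arr[i+1][j], arr[i+1][j+1]])[2], identical in both Pythons
def pvQuad (arr : List (List Int)) (i j : Int) : Int :=
  PySem.List.pyGetD
    (PySem.List.sorted
      [pvCell arr i j, pvCell arr i (j+1), pvCell arr (i+1) j, pvCell arr (i+1) (j+1)]
      (fun x => x)) 2 0

-- ===== PORT A =====
-- new_arr = [[] for _ in range(n//2)]; nested loops appending into new_arr[i//2]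
def stepA (arr : List (List Int)) (n : Int) : List (List Int) :=
  (PySem.List.pyRange 0 n 2).foldl (fun na i =>
    (PySem.List.pyRange 0 n 2).foldl (fun na j =>
      na.modify (PySem.Int.floordiv i 2).toNat (fun row => row ++ [pvQuad arr i j])) na)
    (List.replicate (PySem.Int.floordiv n 2).toNat ([] : List Int))

def pooling (arr : List (List Int)) (n : Int) : Int :=
  if n = 1 then pvCell arr 0 0
  else if n ≤ 0 then 0  -- totality guard: Python recurses forever here (outside Pre_)
  else pooling (stepA arr n) (PySem.Int.floordiv n 2)
termination_by n.toNat
decreasing_by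
  rw [PySem.Int.floordiv_eq_ediv_of_pos (by omega)]
  omega

-- ===== PORT B =====
-- one round of the while-loop body: the nested list comprehension
def stepB (arr : List (List Int)) (n : Int) : List (List Int) :=
  (PySem.List.pyRange 0 n 2).map (fun i =>
    (PySem.List.pyRange 0 n 2).map (fun j => pvQuad arr i j))

-- the while-loop: repeat (arr, n) := (stepB arr n, n // 2) while n > 1
def poolingLoop (arr : List (List Int)) (n : Int) : List (List Int) × Int :=
  if 1 < n then poolingLoop (stepB arr n) (PySem.Int.floordiv n 2) else (arr, n)
termination_by n.toNat
decreasing_by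
  rw [PySem.Int.floordiv_eq_ediv_of_pos (by omega)]
  omega

def pooling_alt (arr : List (List Int)) (n : Int) : Int :=
  pvCell (poolingLoop arr n).1 0 0

-- ===== PRECONDITION & SPEC =====
-- Pre_ admits exactly the inputs A returns on: n a power of two (A's halving otherwise
-- reaches an odd n > 1 and IndexError, or n ≤ 0 and RecursionError) and arr holding at
-- least n rows whose first n each hold at least n entries (else IndexError).
def Pre_pooling (arr : List (List Int)) (n : Int) : Prop :=
  ((List.range 32).any (fun k => n == (2:Int)^k)
    && decide (n.toNat ≤ arr.length)
    && (arr.take n.toNat).all (fun row => decide (n.toNat ≤ row.length))) = true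

instance (arr : List (List Int)) (n : Int) : Decidable (Pre_pooling arr n) := by
  unfold Pre_pooling; infer_instance

def pvWitness_pooling : List (List Int) × Int := ([[1, 2], [3, 4]], 2)

def Spec_pooling (arr : List (List Int)) (n : Int) (out : Int) : Prop := out = pooling_alt arr n
instance (arr : List (List Int)) (n : Int) (out : Int) : Decidable (Spec_pooling arr n out) := by
  unfold Spec_pooling; infer_instance

-- ===== CLAIM (what is proved, stated in full; the proofs are below) =====
def Claim_equal_pooling : Prop := ∀ (arr : List (List Int)) (n : Int),
  Dom_pooling arr n → Pre_pooling arr n → Spec_pooling arr n (pooling arr n)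

-- ===== LEMMAS AND PROOFS =====

theorem pv_modify_modify {α : Type} (l : List α) (p : Nat) (f g : α → α) :
    (l.modify p f).modify p g = l.modify p (fun x => g (f x)) := by
  apply List.ext_getElem
  · simp
  · intro i h1 h2
    simp only [List.getElem_modify]
    split_ifs <;> rfl

theorem pv_modify_append {α : Type} (xs : List α) (y : α) (ys : List α) (f : α → α) :
    (xs ++ y :: ys).modify xs.length f = xs ++ f y :: ys := by
  induction xs with
  | nil => simp [List.modify]
  | cons a xs ih => simpa [List.modify] using ih

theorem pv_range_two (m : Nat) :
    PySem.List.pyRange 0 (2*(m:Int)) 2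
      = (List.range m).map (fun k : Nat => ((2*k : Nat) : Int)) := by
  rw [PySem.List.pyRange_of_pos _ _ (by norm_num)]
  by_cases hm : m = 0
  · subst hm; simp
  · have h1 : ((0:Int) < 2*(m:Int)) := by omega
    have h2 : ((2*(m:Int) - 0 + 2 - 1) / 2).toNat = m := by omega
    rw [if_pos h1, h2]
    simp

theorem pv_fd2' (t : Nat) : (PySem.Int.floordiv (2*(t:Int)) 2).toNat = t := by
  rw [PySem.Int.floordiv_eq_ediv_of_pos (by norm_num)]
  omega

theorem pv_fd2 (t : Nat) : (PySem.Int.floordiv ((2*t : Nat) : Int) 2).toNat = t := by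
  rw [PySem.Int.floordiv_eq_ediv_of_pos (by norm_num)]
  omega

-- inner loop: all appends target the same row index p
theorem pv_inner {α : Type} (js : List α) (na : List (List Int)) (p : Nat) (f : α → Int) :
    js.foldl (fun na j => na.modify p (fun row => row ++ [f j])) na
      = na.modify p (fun row => row ++ js.map f) := by
  induction js generalizing na with
  | nil =>
    simp only [List.foldl_nil, List.map_nil, List.append_nil]
    exact (List.modify_id p na).symm
  | cons j js ih =>
    simp only [List.foldl_cons, List.map_cons]
    rw [ih, pv_modify_modify]
    simp

-- outer loop: the t-th iteration appends row t into an all-empty accumulator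
theorem pv_outer (m : Nat) (r : Nat → List Int) (rest : List (List Int)) :
    (List.range m).foldl (fun na t => na.modify t (fun row => row ++ r t))
      (List.replicate m ([] : List Int) ++ rest)
      = (List.range m).map r ++ rest := by
  induction m generalizing rest with
  | zero => simp
  | succ m ih =>
    rw [List.range_succ, List.foldl_append, List.replicate_succ',
        List.append_assoc, List.singleton_append, ih (([] : List Int) :: rest)]
    simp only [List.foldl_cons, List.foldl_nil]
    have hmod := pv_modify_append ((List.range m).map r) ([] : List Int) rest
      (fun row => row ++ r m)
    rw [List.length_map, List.length_range] at hmod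
    rw [hmod]
    simp

theorem pv_step_eq (arr : List (List Int)) (m : Nat) :
    stepA arr (2*(m:Int)) = stepB arr (2*(m:Int)) := by
  unfold stepA stepB
  rw [pv_range_two, pv_fd2' m, List.foldl_map]
  have hfun : (fun (na : List (List Int)) (t : Nat) =>
      ((List.range m).map (fun k : Nat => ((2*k : Nat) : Int))).foldl
        (fun na j => na.modify (PySem.Int.floordiv ((2*t : Nat) : Int) 2).toNat
          (fun row => row ++ [pvQuad arr ((2*t : Nat) : Int) j])) na)
      = (fun (na : List (List Int)) (t : Nat) =>
          na.modify t (fun row =>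
            row ++ (List.range m).map
              (fun k : Nat => pvQuad arr ((2*t : Nat) : Int) ((2*k : Nat) : Int)))) := by
    funext na t
    rw [pv_inner, pv_fd2, List.map_map]
    rfl
  rw [hfun]
  have hout := pv_outer m
    (fun t => (List.range m).map
      (fun k : Nat => pvQuad arr ((2*t : Nat) : Int) ((2*k : Nat) : Int))) []
  simp only [List.append_nil] at hout
  rw [hout]
  simp [List.map_map]

theorem pv_loop_step (arr : List (List Int)) (n : Int) (h : 1 < n) :
    pooling_alt arr n = pooling_alt (stepB arr n) (PySem.Int.floordiv n 2) := by
  unfold pooling_alt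
  rw [poolingLoop, if_pos h]

theorem pv_pow_eq (k : Nat) : ∀ arr : List (List Int),
    pooling arr ((2:Int)^k) = pooling_alt arr ((2:Int)^k) := by
  induction k with
  | zero =>
    intro arr
    rw [pooling, if_pos (by norm_num)]
    unfold pooling_alt
    rw [poolingLoop, if_neg (by norm_num)]
  | succ k ih =>
    intro arr
    have h2 : (1:Int) < 2^(k+1) := one_lt_pow₀ (by norm_num) (by omega)
    have hhalf : PySem.Int.floordiv ((2:Int)^(k+1)) 2 = 2^k := by
      rw [PySem.Int.floordiv_eq_ediv_of_pos (by norm_num), pow_succ, mul_comm]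
      exact Int.mul_ediv_cancel_left _ (by norm_num)
    have hstep : stepA arr ((2:Int)^(k+1)) = stepB arr ((2:Int)^(k+1)) := by
      have hc : ((2:Int)^(k+1)) = ((2*(2^k) : Nat) : Int) := by push_cast; ring
      rw [hc]
      have := pv_step_eq arr (2^k)
      rwa [show ((2:Int)*((2^k : Nat) : Int)) = ((2*(2^k) : Nat) : Int) by push_cast; ring] at this
    rw [pooling, if_neg (ne_of_gt h2), if_neg (not_le.mpr (by positivity)), hhalf, hstep,
        pv_loop_step arr _ h2, hhalf]
    exact ih (stepB arr (2^(k+1)))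

-- ===== VERDICT (by name: the statement is the Claim_ definition above) =====
theorem pooling_spec : Claim_equal_pooling := by
  intro arr n _ hpre
  unfold Pre_pooling at hpre
  simp only [Bool.and_eq_true, List.any_eq_true, List.mem_range, beq_iff_eq] at hpre
  obtain ⟨⟨⟨k, _, hk⟩, _⟩, _⟩ := hpre
  unfold Spec_pooling
  rw [hk]
  exact pv_pow_eq k arr
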